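-- pv_equiv track=rewrite | github.com/tazomatalax/prescience | task_coauthor_prediction/train_projection.py | get_pubs_before
-- ===== SOURCE A (Python) =====
-- from bisect import bisect_left
--
-- def get_pubs_before(author_id, cutoff_date, sd2publications, all_papers_dict):
--     """Get an author's publications before cutoff_date using binary search."""
--     if author_id not in sd2publications:
--         return []
--     author_pubs = sd2publications[author_id]
--     if author_pubs is None:
--         return []
--     pub_dates = [all_papers_dict[p]["date"] for p in author_pubs]
--     idx = bisect_left(pub_dates, cutoff_date)
--     return author_pubs[:idx]
-- ===== SOURCE B (Python) =====
-- def get_pubs_before(author_id, cutoff_date, sd2publications, all_papers_dict):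
--     """Get an author's publications before cutoff_date by divide-and-conquer:
--     recursively split the publication list around its midpoint and emit kept
--     prefixes directly; no dates list is materialised and no final index slice."""
--     pubs = sd2publications.get(author_id)
--     if pubs is None:
--         return []
--
--     def before(seg):
--         if not seg:
--             return []
--         mid = len(seg) // 2
--         if all_papers_dict[seg[mid]]["date"] < cutoff_date:
--             return seg[:mid + 1] + before(seg[mid + 1:])
--         return before(seg[:mid])
--
--     return before(pubs)
-- ===== Notes on version B (the rewrite author's own statement) =====
-- stated objective: alternative
-- what changed: Instead of materialising the full list of publication dates, calling library bisect_left and slicing by the returned index, B runs a divide-and-conquer recursion on the publication list itself, splitting at the midpoint and concatenating kept prefixes directly, with dates looked up only at the O(log n) probed midpoints.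
import Mathlib
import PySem

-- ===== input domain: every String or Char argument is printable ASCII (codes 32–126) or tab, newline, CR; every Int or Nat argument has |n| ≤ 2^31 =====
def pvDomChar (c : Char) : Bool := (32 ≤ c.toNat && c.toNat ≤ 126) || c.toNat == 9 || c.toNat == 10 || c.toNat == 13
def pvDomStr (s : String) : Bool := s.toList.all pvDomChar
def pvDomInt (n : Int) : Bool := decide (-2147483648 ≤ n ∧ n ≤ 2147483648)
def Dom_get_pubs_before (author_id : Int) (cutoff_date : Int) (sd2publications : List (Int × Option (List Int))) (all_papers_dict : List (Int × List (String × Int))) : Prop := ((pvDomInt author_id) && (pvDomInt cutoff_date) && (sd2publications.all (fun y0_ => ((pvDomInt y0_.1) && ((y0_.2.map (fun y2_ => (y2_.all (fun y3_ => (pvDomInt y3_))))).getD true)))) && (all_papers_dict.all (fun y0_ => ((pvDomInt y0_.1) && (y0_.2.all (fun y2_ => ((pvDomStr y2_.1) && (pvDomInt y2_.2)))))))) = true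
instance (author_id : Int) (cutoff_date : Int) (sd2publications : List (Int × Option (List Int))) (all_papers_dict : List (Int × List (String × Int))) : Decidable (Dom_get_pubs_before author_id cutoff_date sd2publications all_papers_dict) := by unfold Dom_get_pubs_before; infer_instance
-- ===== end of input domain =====

-- B replaces the materialised dates list + library bisect + index slice by a
-- divide-and-conquer recursion on the publication list itself that emits kept
-- prefixes directly, looking dates up only at the probed midpoints (objective: alternative).


-- shared dict lookup helper: all_papers_dict[p]["date"]; the .getD defaults are never
-- reached under Pre_get_pubs_before (Python raises KeyError exactly there)
def pvDate (all_papers_dict : List (Int × List (String × Int))) (p : Int) : Int :=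
  ((((all_papers_dict.lookup p).getD []).lookup "date").getD 0)

-- ===== PORT A =====
-- hand-port of Python's bisect.bisect_left on a list of ints (exact: the CPython loop;
-- fuel only makes the recursion structural — it starts at hi - lo ≥ the number of iterations, so it never runs out)
def pvBisectLeft (a : List Int) (x : Int) : Nat → Nat → Nat → Nat
  | 0, lo, _ => lo
  | fuel + 1, lo, hi =>
    if lo < hi then
      let mid := (lo + hi) / 2
      if a.getD mid 0 < x then pvBisectLeft a x fuel (mid + 1) hi
      else pvBisectLeft a x fuel lo mid
    else lo

def get_pubs_before (author_id : Int) (cutoff_date : Int) (sd2publications : List (Int × Option (List Int))) (all_papers_dict : List (Int × List (String × Int))) : List Int :=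
  match sd2publications.lookup author_id with
  | none => []                       -- author_id not in sd2publications
  | some author_pubs =>
    match author_pubs with
    | none => []                     -- author_pubs is None
    | some pubs =>
      let pub_dates := pubs.map (pvDate all_papers_dict)
      let idx := pvBisectLeft pub_dates cutoff_date pub_dates.length 0 pub_dates.length
      pubs.take idx                  -- author_pubs[:idx], idx ≥ 0

-- ===== PORT B =====
-- the inner recursion of Source B: split the segment at its midpoint; slices seg[:k]/seg[k:]
-- with 0 ≤ k are exactly List.take/List.drop; seg[mid] with mid < seg.length is getD mid
def pvBefore (all_papers_dict : List (Int × List (String × Int))) (cutoff_date : Int) (seg : List Int) : List Int :=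
  if seg.isEmpty then []
  else
    let mid := seg.length / 2
    if pvDate all_papers_dict (seg.getD mid 0) < cutoff_date then
      seg.take (mid + 1) ++ pvBefore all_papers_dict cutoff_date (seg.drop (mid + 1))
    else
      pvBefore all_papers_dict cutoff_date (seg.take mid)
termination_by seg.length
decreasing_by
  · have : seg.length ≠ 0 := by simpa [List.isEmpty_iff_length_eq_zero] using ‹¬ seg.isEmpty = true›
    simp [List.length_drop]; omega
  · have : seg.length ≠ 0 := by simpa [List.isEmpty_iff_length_eq_zero] using ‹¬ seg.isEmpty = true›
    simp [List.length_take]; omega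

def get_pubs_before_alt (author_id : Int) (cutoff_date : Int) (sd2publications : List (Int × Option (List Int))) (all_papers_dict : List (Int × List (String × Int))) : List Int :=
  match (sd2publications.lookup author_id).getD none with   -- sd2publications.get(author_id)
  | none => []
  | some pubs => pvBefore all_papers_dict cutoff_date pubs

-- ===== PRECONDITION & SPEC =====
-- Pre_ excludes exactly the inputs where Python A raises KeyError: some publication of the
-- looked-up author is missing from all_papers_dict, or its paper dict has no "date" key.
def pvPreCheck (author_id : Int) (sd2publications : List (Int × Option (List Int))) (all_papers_dict : List (Int × List (String × Int))) : Bool :=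
  -- e.g. author_id = 2 with sd2publications = [(2, some [3])] and all_papers_dict = [(3, [])]
  -- is excluded: paper 3 has no "date" entry, so Python A raises KeyError there
  match (sd2publications.lookup author_id).getD none with
  | none => true
  | some pubs => pubs.all (fun p => (((all_papers_dict.lookup p).getD []).lookup "date").isSome)

def Pre_get_pubs_before (author_id : Int) (cutoff_date : Int) (sd2publications : List (Int × Option (List Int))) (all_papers_dict : List (Int × List (String × Int))) : Prop :=
  pvPreCheck author_id sd2publications all_papers_dict = true
instance (author_id : Int) (cutoff_date : Int) (sd2publications : List (Int × Option (List Int))) (all_papers_dict : List (Int × List (String × Int))) : Decidable (Pre_get_pubs_before author_id cutoff_date sd2publications all_papers_dict) := by unfold Pre_get_pubs_before; infer_instance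

def pvWitness_get_pubs_before : Int × Int × (List (Int × Option (List Int))) × (List (Int × List (String × Int))) :=
  (1, 10, [(1, some [100, 101])], [(100, [("date", 5)]), (101, [("date", 20)])])

def Spec_get_pubs_before (author_id : Int) (cutoff_date : Int) (sd2publications : List (Int × Option (List Int))) (all_papers_dict : List (Int × List (String × Int))) (out : List Int) : Prop := out = get_pubs_before_alt author_id cutoff_date sd2publications all_papers_dict
instance (author_id : Int) (cutoff_date : Int) (sd2publications : List (Int × Option (List Int))) (all_papers_dict : List (Int × List (String × Int))) (out : List Int) : Decidable (Spec_get_pubs_before author_id cutoff_date sd2publications all_papers_dict out) := by unfold Spec_get_pubs_before; infer_instance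

-- ===== CLAIM (what is proved, stated in full; the proofs are below) =====
def Claim_equal_get_pubs_before : Prop := ∀ (author_id : Int) (cutoff_date : Int) (sd2publications : List (Int × Option (List Int))) (all_papers_dict : List (Int × List (String × Int))), Dom_get_pubs_before author_id cutoff_date sd2publications all_papers_dict → Pre_get_pubs_before author_id cutoff_date sd2publications all_papers_dict → Spec_get_pubs_before author_id cutoff_date sd2publications all_papers_dict (get_pubs_before author_id cutoff_date sd2publications all_papers_dict)

-- ===== LEMMAS AND PROOFS =====

-- (a.take m).getD i 0 = a.getD i 0 for i < m
theorem pv_getD_take (a : List Int) (m i : Nat) (h : i < m) :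
    (a.take m).getD i 0 = a.getD i 0 := by
  by_cases hi : i < a.length
  · rw [List.getD_eq_getElem _ _ (by simp [List.length_take]; omega),
        List.getD_eq_getElem _ _ hi, List.getElem_take]
  · rw [List.getD_eq_default _ _ (by simp [List.length_take]; omega),
        List.getD_eq_default _ _ (by omega)]

-- fuel irrelevance: any fuel ≥ hi - lo gives the same result
theorem pv_fuel (a : List Int) (x : Int) :
    ∀ f g lo hi, hi - lo ≤ f → hi - lo ≤ g →
      pvBisectLeft a x f lo hi = pvBisectLeft a x g lo hi := by
  intro f
  induction f with
  | zero =>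
    intro g lo hi hf _
    cases g with
    | zero => rfl
    | succ g' =>
      unfold pvBisectLeft
      have : ¬ lo < hi := by omega
      simp [this]
  | succ f' ih =>
    intro g lo hi hf hg
    cases g with
    | zero =>
      unfold pvBisectLeft
      have : ¬ lo < hi := by omega
      simp [this]
    | succ g' =>
      unfold pvBisectLeft
      by_cases h : lo < hi
      · simp only [h, if_pos]
        have hmlo : lo ≤ (lo + hi) / 2 := by omega
        have hmhi : (lo + hi) / 2 < hi := by omega
        by_cases hc : a.getD ((lo + hi) / 2) 0 < x
        · simp only [hc, if_pos]; exact ih _ _ _ (by omega) (by omega)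
        · simp only [hc, if_neg, not_false_iff]; exact ih _ _ _ (by omega) (by omega)
      · simp [h]

-- translation: bisect over the window [s+lo, s+hi) of a is s + bisect over [lo, hi) of a.drop s
theorem pv_shift (a : List Int) (x : Int) (s : Nat) :
    ∀ fuel lo hi, s + hi ≤ a.length →
      pvBisectLeft a x fuel (s + lo) (s + hi) = s + pvBisectLeft (a.drop s) x fuel lo hi := by
  intro fuel
  induction fuel generalizing s with
  | zero => intro lo hi _; rfl
  | succ f ih =>
    intro lo hi hlen
    unfold pvBisectLeft
    by_cases h : lo < hi
    · have h' : s + lo < s + hi := by omega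
      simp only [h, h', if_pos]
      have hmid : (s + lo + (s + hi)) / 2 = s + (lo + hi) / 2 := by omega
      have hm2 : (lo + hi) / 2 < hi := by omega
      have hget : a.getD ((s + lo + (s + hi)) / 2) 0 = (a.drop s).getD ((lo + hi) / 2) 0 := by
        rw [hmid, List.getD_eq_getElem _ _ (by omega),
            List.getD_eq_getElem _ _ (by simp [List.length_drop]; omega), List.getElem_drop]
      rw [hget]
      by_cases hc : (a.drop s).getD ((lo + hi) / 2) 0 < x
      · simp only [hc, if_pos]
        have : (s + lo + (s + hi)) / 2 + 1 = s + ((lo + hi) / 2 + 1) := by omega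
        rw [this]; exact ih s _ _ hlen
      · simp only [hc, if_neg, not_false_iff]
        rw [hmid]; exact ih s _ _ (by omega)
    · have h' : ¬ s + lo < s + hi := by omega
      simp [h, h']

-- restriction: bisect over [lo, hi) only probes indices < hi ≤ m, so a.take m is as good as a
theorem pv_take (a : List Int) (x : Int) (m : Nat) :
    ∀ fuel lo hi, hi ≤ m →
      pvBisectLeft a x fuel lo hi = pvBisectLeft (a.take m) x fuel lo hi := by
  intro fuel
  induction fuel with
  | zero => intro lo hi _; rfl
  | succ f ih =>
    intro lo hi hm
    unfold pvBisectLeft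
    by_cases h : lo < hi
    · simp only [h, if_pos]
      rw [← pv_getD_take a m ((lo + hi) / 2) (by omega)]
      by_cases hc : (a.take m).getD ((lo + hi) / 2) 0 < x
      · simp only [hc, if_pos]; exact ih _ _ hm
      · simp only [hc, if_neg, not_false_iff]; exact ih _ _ (by omega)
    · simp [h]

-- the result of bisect stays within [lo, hi]
theorem pv_le (a : List Int) (x : Int) :
    ∀ fuel lo hi, lo ≤ hi → pvBisectLeft a x fuel lo hi ≤ hi := by
  intro fuel
  induction fuel with
  | zero => intro lo hi h; simpa [pvBisectLeft]
  | succ f ih =>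
    intro lo hi h
    unfold pvBisectLeft
    by_cases hlt : lo < hi
    · simp only [hlt, if_pos]
      by_cases hc : a.getD ((lo + hi) / 2) 0 < x
      · simp only [hc, if_pos]; exact ih _ _ (by omega)
      · simp only [hc, if_neg, not_false_iff]
        exact le_trans (ih _ _ (by omega)) (by omega)
    · simpa [hlt]

-- main lemma: the divide-and-conquer recursion of B computes A's take-of-bisect
theorem pvBefore_eq (apd : List (Int × List (String × Int))) (x : Int) :
    ∀ n seg, seg.length = n →
      pvBefore apd x seg
        = seg.take (pvBisectLeft (seg.map (pvDate apd)) x n 0 n) := by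
  intro n
  induction n using Nat.strong_induction_on with
  | _ n ih =>
    intro seg hlen
    cases n with
    | zero =>
      have : seg = [] := List.length_eq_zero_iff.mp hlen
      subst this
      simp [pvBefore, pvBisectLeft]
    | succ n' =>
      have hne : seg.isEmpty = false := by
        cases seg with
        | nil => simp at hlen
        | cons a t => rfl
      rw [pvBefore, hne]
      simp only [Bool.false_eq_true, if_false, hlen]
      set mid := (n' + 1) / 2 with hmid
      have hmlt : mid < n' + 1 := by omega
      -- unfold one step of the bisect
      conv_rhs => rw [pvBisectLeft]
      have h0 : (0 : Nat) < n' + 1 := by omega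
      simp only [h0, if_pos, Nat.zero_add]
      have hget : (seg.map (pvDate apd)).getD mid 0 = pvDate apd (seg.getD mid 0) := by
        rw [List.getD_eq_getElem _ _ (by simp [hlen]; omega),
            List.getD_eq_getElem _ _ (by omega), List.getElem_map]
      rw [hget]
      by_cases hc : pvDate apd (seg.getD mid 0) < x
      · simp only [hc, if_pos]
        -- A side: bisect continues on [mid+1, n'+1); shift by s = mid+1
        have hsh : pvBisectLeft (seg.map (pvDate apd)) x n' (mid + 1) (n' + 1)
            = (mid + 1) + pvBisectLeft ((seg.map (pvDate apd)).drop (mid + 1)) x n' 0 (n' - mid) := by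
          have := pv_shift (seg.map (pvDate apd)) x (mid + 1) n' 0 (n' - mid) (by simp [hlen]; omega)
          simpa [Nat.add_zero, show mid + 1 + (n' - mid) = n' + 1 by omega] using this
        rw [hsh, ← List.map_drop]
        have hfuel : pvBisectLeft ((seg.drop (mid + 1)).map (pvDate apd)) x n' 0 (n' - mid)
            = pvBisectLeft ((seg.drop (mid + 1)).map (pvDate apd)) x (n' - mid) 0 (n' - mid) :=
          pv_fuel _ _ _ _ _ _ (by omega) (by omega)
        rw [hfuel]
        have hdl : (seg.drop (mid + 1)).length = n' - mid := by simp [hlen]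
        rw [ih (n' - mid) (by omega) (seg.drop (mid + 1)) hdl]
        exact (List.take_add (l := seg) (i := mid + 1)).symm
      · simp only [hc, if_neg, not_false_iff]
        -- A side: bisect continues on [0, mid); restrict to the take-mid prefix
        rw [pv_take (seg.map (pvDate apd)) x mid n' 0 mid (le_refl _), ← List.map_take]
        have hfuel : pvBisectLeft ((seg.take mid).map (pvDate apd)) x n' 0 mid
            = pvBisectLeft ((seg.take mid).map (pvDate apd)) x mid 0 mid :=
          pv_fuel _ _ _ _ _ _ (by omega) (by omega)
        rw [hfuel]
        have htl : (seg.take mid).length = mid := by simp [hlen]; omega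
        -- B side: pvBefore on the prefix equals (seg.take mid).take k with k ≤ mid
        rw [ih mid (by omega) (seg.take mid) htl]
        have hk := pv_le ((seg.take mid).map (pvDate apd)) x mid 0 mid (by omega)
        rw [List.take_take]
        congr 1
        omega

-- ===== VERDICT (by name: the statement is the Claim_ definition above) =====
theorem get_pubs_before_spec : Claim_equal_get_pubs_before := by
  intro author_id cutoff_date sd2publications all_papers_dict _ _
  unfold Spec_get_pubs_before get_pubs_before get_pubs_before_alt
  cases hl : sd2publications.lookup author_id with
  | none => simp
  | some v =>
    cases v with
    | none => simp
    | some pubs =>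
      simp only [Option.getD_some, List.length_map]
      rw [pvBefore_eq all_papers_dict cutoff_date pubs.length pubs rfl]
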